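-- pv_equiv track=rewrite | github.com/golker16/acordes-beatmakingversion | app.py | snap_list_to_pcs
-- ===== SOURCE A (Python) =====
-- from typing import List, Dict, Tuple, Optional
--
-- def snap_list_to_pcs(notes: List[int], allowed_pcs: set):
--     snapped, changed = [], 0
--     for n in notes:
--         base_oct = n // 12; pc = n % 12
--         if pc in allowed_pcs:
--             snapped.append(n); continue
--         best = None
--         for d in range(1, 6):
--             up = pc + d; dn = pc - d
--             if 0 <= up <= 11 and up in allowed_pcs:
--                 best = base_oct*12 + up; break
--             if 0 <= dn <= 11 and dn in allowed_pcs: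
--                 best = base_oct*12 + dn; break
--         if best is None:
--             best = n
--         if best != n:
--             changed += 1
--         snapped.append(best)
--     return snapped, changed
-- ===== SOURCE B (Python) =====
-- _OFFSETS = (0, 1, -1, 2, -2, 3, -3, 4, -4, 5, -5)
--
-- def snap_list_to_pcs(notes, allowed_pcs):
--     # Precompute, once, the snapped pitch class for each of the 12 pitch classes,
--     # then make a single pass over the notes using that table.
--     table = [next((pc + o for o in _OFFSETS
--                    if 0 <= pc + o <= 11 and (pc + o) in allowed_pcs), pc)
--              for pc in range(12)]
--     snapped, changed = [], 0
--     for n in notes: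
--         pc = n % 12
--         t = table[pc]
--         snapped.append(n - pc + t)
--         if t != pc:
--             changed += 1
--     return snapped, changed
-- ===== Notes on version B (the rewrite author's own statement) =====
-- stated objective: faster
-- what changed: B precomputes a 12-entry snapping table (each pitch class mapped via a single preference-ordered offset list 0,+1,-1,...,+5,-5) and then does one table-lookup pass over the notes, instead of A's per-note nested search loop.
import Mathlib
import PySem

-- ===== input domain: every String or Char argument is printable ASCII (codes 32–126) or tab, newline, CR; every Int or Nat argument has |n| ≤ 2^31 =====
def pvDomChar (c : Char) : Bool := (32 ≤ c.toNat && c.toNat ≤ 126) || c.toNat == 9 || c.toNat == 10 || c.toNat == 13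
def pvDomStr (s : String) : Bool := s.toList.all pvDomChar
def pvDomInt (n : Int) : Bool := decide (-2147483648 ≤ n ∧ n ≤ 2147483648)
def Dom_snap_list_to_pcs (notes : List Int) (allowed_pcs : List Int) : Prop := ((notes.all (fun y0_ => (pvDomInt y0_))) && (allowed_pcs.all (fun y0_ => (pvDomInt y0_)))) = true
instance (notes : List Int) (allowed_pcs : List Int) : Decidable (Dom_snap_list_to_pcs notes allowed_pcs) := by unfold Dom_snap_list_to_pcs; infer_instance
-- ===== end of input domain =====

-- B replaces A's per-note up/down search by a precomputed 12-entry pitch-class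
-- snapping table and a single lookup pass over the notes (objective: faster,
-- constant-factor: membership tests happen 12·11 times total, not per note).

-- ===== PORT A =====
-- A's inner 'for d in range(1, 6)' loop with its two breaks; returns best (None = no hit)
def pvALoop (base_oct pc : Int) (allowed : List Int) : List Int → Option Int
  | [] => none
  | d :: ds =>
    let up := pc + d
    let dn := pc - d
    if 0 ≤ up ∧ up ≤ 11 ∧ up ∈ allowed then some (base_oct * 12 + up)
    else if 0 ≤ dn ∧ dn ≤ 11 ∧ dn ∈ allowed then some (base_oct * 12 + dn)
    else pvALoop base_oct pc allowed ds

def snap_list_to_pcs (notes : List Int) (allowed_pcs : List Int) : List Int × Int :=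
  notes.foldl (fun acc n =>
    let base_oct := PySem.Int.floordiv n 12
    let pc := PySem.Int.mod n 12
    if pc ∈ allowed_pcs then (acc.1 ++ [n], acc.2)
    else
      let best := (pvALoop base_oct pc allowed_pcs (PySem.List.pyRange 1 6 1)).getD n
      (acc.1 ++ [best], if best ≠ n then acc.2 + 1 else acc.2)) ([], 0)

-- ===== PORT B =====
def pvOffsets : List Int := [0, 1, -1, 2, -2, 3, -3, 4, -4, 5, -5]

-- B's 'next((pc + o for o in _OFFSETS if …), pc)'
def pvBFind (pc : Int) (allowed : List Int) : List Int → Int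
  | [] => pc
  | o :: os =>
    if 0 ≤ pc + o ∧ pc + o ≤ 11 ∧ (pc + o) ∈ allowed then pc + o
    else pvBFind pc allowed os

-- B's table comprehension over range(12)
def pvTable (allowed : List Int) : List Int :=
  (PySem.List.pyRange 0 12 1).map (fun pc => pvBFind pc allowed pvOffsets)

def snap_list_to_pcs_alt (notes : List Int) (allowed_pcs : List Int) : List Int × Int :=
  let table := pvTable allowed_pcs
  notes.foldl (fun acc n =>
    let pc := PySem.Int.mod n 12
    -- table[pc]: pc = n % 12 ∈ [0, 12) is always in range, so the default is never used
    let t := PySem.List.pyGetD table pc 0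
    (acc.1 ++ [n - pc + t], if t ≠ pc then acc.2 + 1 else acc.2)) ([], 0)

-- ===== PRECONDITION & SPEC =====
def Spec_snap_list_to_pcs (notes : List Int) (allowed_pcs : List Int) (out : List Int × Int) : Prop := out = snap_list_to_pcs_alt notes allowed_pcs
instance (notes : List Int) (allowed_pcs : List Int) (out : List Int × Int) : Decidable (Spec_snap_list_to_pcs notes allowed_pcs out) := by unfold Spec_snap_list_to_pcs; infer_instance

-- ===== CLAIM (what is proved, stated in full; the proofs are below) =====
def Claim_equal_snap_list_to_pcs : Prop := ∀ (notes : List Int) (allowed_pcs : List Int), Dom_snap_list_to_pcs notes allowed_pcs → Spec_snap_list_to_pcs notes allowed_pcs (snap_list_to_pcs notes allowed_pcs)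

-- ===== LEMMAS AND PROOFS =====

-- proof-side: the first candidate pc + o (o from os) that is in range and allowed
def pvOptFind (pc : Int) (allowed : List Int) : List Int → Option Int
  | [] => none
  | o :: os =>
    if 0 ≤ pc + o ∧ pc + o ≤ 11 ∧ (pc + o) ∈ allowed then some (pc + o)
    else pvOptFind pc allowed os

-- proof-side: interleave each distance d as offsets d, -d
def pvInter : List Int → List Int
  | [] => []
  | d :: ds => d :: (-d) :: pvInter ds

lemma pvBFind_eq (pc : Int) (allowed : List Int) (os : List Int) :
    pvBFind pc allowed os = (pvOptFind pc allowed os).getD pc := by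
  induction os with
  | nil => rfl
  | cons o os ih =>
    simp only [pvBFind, pvOptFind]
    split_ifs with h
    · rfl
    · exact ih

lemma pvALoop_eq (b pc : Int) (allowed : List Int) (ds : List Int) :
    pvALoop b pc allowed ds
      = (pvOptFind pc allowed (pvInter ds)).map (fun c => b * 12 + c) := by
  induction ds with
  | nil => rfl
  | cons d ds ih =>
    simp only [pvALoop, pvInter, pvOptFind, sub_eq_add_neg]
    split_ifs with h1 h2
    · rfl
    · rfl
    · exact ih

lemma pvOptFind_some (pc : Int) (allowed : List Int) (os : List Int) (c : Int)
    (h : pvOptFind pc allowed os = some c) : 0 ≤ c ∧ c ≤ 11 ∧ c ∈ allowed := by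
  induction os with
  | nil => simp [pvOptFind] at h
  | cons o os ih =>
    simp only [pvOptFind] at h
    split_ifs at h with hc
    · cases h; exact hc
    · exact ih h

lemma pvTable_get (allowed : List Int) (pc : Int) (h0 : 0 ≤ pc) (h12 : pc < 12) :
    PySem.List.pyGetD (pvTable allowed) pc 0 = pvBFind pc allowed pvOffsets := by
  unfold pvTable
  exact PySem.List.pyGetD_map_pyRange_of_nonneg _ 12 pc 0 h0 h12

lemma pvStep_eq (allowed : List Int) (acc : List Int × Int) (n : Int) :
    (if PySem.Int.mod n 12 ∈ allowed then (acc.1 ++ [n], acc.2)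
     else
       (acc.1 ++ [(pvALoop (PySem.Int.floordiv n 12) (PySem.Int.mod n 12) allowed
                     (PySem.List.pyRange 1 6 1)).getD n],
        if (pvALoop (PySem.Int.floordiv n 12) (PySem.Int.mod n 12) allowed
              (PySem.List.pyRange 1 6 1)).getD n ≠ n then acc.2 + 1 else acc.2))
    = (acc.1 ++ [n - PySem.Int.mod n 12
                   + PySem.List.pyGetD (pvTable allowed) (PySem.Int.mod n 12) 0],
       if PySem.List.pyGetD (pvTable allowed) (PySem.Int.mod n 12) 0 ≠ PySem.Int.mod n 12
       then acc.2 + 1 else acc.2) := by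
  have h0 : (0:Int) < 12 := by norm_num
  have hpc0 : 0 ≤ PySem.Int.mod n 12 := PySem.Int.mod_nonneg n h0
  have hpc12 : PySem.Int.mod n 12 < 12 := PySem.Int.mod_lt n h0
  have hn : PySem.Int.floordiv n 12 * 12 + PySem.Int.mod n 12 = n :=
    PySem.Int.floordiv_mul_add_mod n 12
  set b := PySem.Int.floordiv n 12 with hb
  set pc := PySem.Int.mod n 12 with hpc
  have h11 : pc ≤ 11 := by omega
  have hrange : PySem.List.pyRange 1 6 1 = [1, 2, 3, 4, 5] := by decide
  have htab := pvTable_get allowed pc hpc0 hpc12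
  rw [htab, hrange]
  by_cases hmem : pc ∈ allowed
  · have ht : pvBFind pc allowed pvOffsets = pc := by
      simp [pvOffsets, pvBFind, hpc0, h11, hmem]
    rw [if_pos hmem, ht]
    have h1 : n - pc + pc = n := by omega
    simp [h1]
  · have ht : pvBFind pc allowed pvOffsets
        = (pvOptFind pc allowed (pvInter [1, 2, 3, 4, 5])).getD pc := by
      have ho : pvOffsets = 0 :: pvInter [1, 2, 3, 4, 5] := by decide
      rw [ho, pvBFind]
      simp only [add_zero]
      rw [if_neg (by tauto), pvBFind_eq]
    rw [if_neg hmem, ht, pvALoop_eq]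
    cases hfind : pvOptFind pc allowed (pvInter [1, 2, 3, 4, 5]) with
    | none =>
      simp only [Option.map_none, Option.getD_none]
      have h1 : n - pc + pc = n := by omega
      simp [h1]
    | some c =>
      obtain ⟨hc0, hc11, hcmem⟩ := pvOptFind_some pc allowed _ c hfind
      have hne : c ≠ pc := fun h => hmem (h ▸ hcmem)
      simp only [Option.map_some, Option.getD_some]
      have h1 : b * 12 + c = n - pc + c := by omega
      have h2 : ¬ n - pc + c = n := by omega
      simp [h1, h2, hne]

lemma pvFoldl_eq {α β : Type} (f g : β → α → β) (l : List α)
    (h : ∀ acc x, f acc x = g acc x) : ∀ acc, l.foldl f acc = l.foldl g acc := by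
  induction l with
  | nil => intro acc; rfl
  | cons x xs ih => intro acc; simp only [List.foldl_cons, h]; exact ih _

-- ===== VERDICT (by name: the statement is the Claim_ definition above) =====
theorem snap_list_to_pcs_spec : Claim_equal_snap_list_to_pcs := by
  intro notes allowed _
  unfold Spec_snap_list_to_pcs snap_list_to_pcs snap_list_to_pcs_alt
  exact pvFoldl_eq _ _ notes (fun acc n => pvStep_eq allowed acc n) ([], 0)
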